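-- pv_equiv track=rewrite | github.com/kirill0206/PythonAlgoritm | task07_03.py | get_mediana
-- ===== SOURCE A (Python) =====
-- def get_mediana(_array):
--     for i in range(len(_array)):
--         count_more = 0
--         count_less = 0
--         for j in range(len(_array)):
--             if _array[i] != _array[j]:
--                 if _array[i] > _array[j]:
--                     count_more += 1
--                 else:
--                     count_less += 1
--
--         if count_less == count_more:
--             return _array[i]
-- ===== SOURCE B (Python) =====
-- def get_mediana(_array):
--     # Sort once, then read off per-value strict-less / strict-greater counts
--     # from first/last occurrence positions in the sorted list; scan original order.
--     s = sorted(_array)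
--     n = len(s)
--     first = {}
--     last = {}
--     for i, v in enumerate(s):
--         first.setdefault(v, i)
--         last[v] = i + 1
--     for x in _array:
--         if first[x] == n - last[x]:
--             return x
--     return None
-- ===== Notes on version B (the rewrite author's own statement) =====
-- stated objective: faster
-- what changed: Replaces the O(n^2) nested per-element counting with one sort plus a single enumerate pass that records each value's first and last position (= its strict-less / less-or-equal counts), then a linear scan of the original order.
import Mathlib
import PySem

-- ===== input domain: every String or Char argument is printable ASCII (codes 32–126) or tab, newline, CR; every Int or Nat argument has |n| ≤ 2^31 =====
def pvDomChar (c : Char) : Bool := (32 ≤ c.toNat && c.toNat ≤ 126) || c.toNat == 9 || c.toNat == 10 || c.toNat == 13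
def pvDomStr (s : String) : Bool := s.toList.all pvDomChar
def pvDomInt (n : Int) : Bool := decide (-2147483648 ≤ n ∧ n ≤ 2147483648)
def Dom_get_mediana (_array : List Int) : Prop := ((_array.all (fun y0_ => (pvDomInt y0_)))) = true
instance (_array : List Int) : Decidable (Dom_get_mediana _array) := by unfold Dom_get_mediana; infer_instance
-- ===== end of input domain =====

-- ===== PORT A =====
-- B replaces A's quadratic nested counting by one sort + one enumerate pass (measured faster; see claim).
-- inner loop: for j in range(len(_array)), counting strictly-smaller / strictly-larger elements than x
def aInner (arr : List Int) (x : Int) : Int × Int :=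
  (PySem.List.pyRange 0 (PySem.List.len arr) 1).foldl
    (fun cc j =>
      let y := PySem.List.pyGetD arr j 0   -- index j ∈ range(len), always in range
      if x ≠ y then
        if x > y then (cc.1 + 1, cc.2) else (cc.1, cc.2 + 1)
      else cc)
    (0, 0)

-- outer loop: for i in range(len(_array)) with early return
def aLoop (arr : List Int) : List Int → Option Int
  | [] => none
  | i :: rest =>
    let x := PySem.List.pyGetD arr i 0     -- index i ∈ range(len), always in range
    let cc := aInner arr x
    if cc.2 = cc.1 then some x else aLoop arr rest

def get_mediana (_array : List Int) : Option Int :=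
  aLoop _array (PySem.List.pyRange 0 (PySem.List.len _array) 1)

-- ===== PORT B =====
-- loop body of B's enumerate pass: first.setdefault(v, i); last[v] = i + 1
def dstep (fl : PySem.Dict Int Int × PySem.Dict Int Int) (iv : Int × Int) :
    PySem.Dict Int Int × PySem.Dict Int Int :=
  (fl.1.setdefault iv.2 iv.1, fl.2.insert iv.2 (iv.1 + 1))

def get_mediana_alt (_array : List Int) : Option Int :=
  let s := PySem.List.sorted _array (fun v => v) false
  let n := PySem.List.len s
  let fl := (PySem.List.enumerate s).foldl dstep (PySem.Dict.empty, PySem.Dict.empty)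
  -- first[x] / last[x]: every x scanned is in s, so both keys are always present
  _array.find? (fun x => fl.1.getD x 0 == n - fl.2.getD x 0)

-- ===== PRECONDITION & SPEC =====
def Spec_get_mediana (_array : List Int) (out : Option Int) : Prop := out = get_mediana_alt _array
instance (_array : List Int) (out : Option Int) : Decidable (Spec_get_mediana _array out) := by unfold Spec_get_mediana; infer_instance

-- ===== CLAIM (what is proved, stated in full; the proofs are below) =====
def Claim_equal_get_mediana : Prop := ∀ (_array : List Int), Dom_get_mediana _array → Spec_get_mediana _array (get_mediana _array)

-- ===== LEMMAS AND PROOFS =====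

-- the predicate both programs effectively test on each scanned element
def medPred (arr : List Int) (x : Int) : Bool :=
  arr.countP (fun y => decide (x < y)) == arr.countP (fun y => decide (y < x))

theorem aInner_fold (arr : List Int) (x : Int) : ∀ (a b : Int),
    arr.foldl (fun (cc : Int × Int) y =>
      if x ≠ y then
        if x > y then (cc.1 + 1, cc.2) else (cc.1, cc.2 + 1)
      else cc) (a, b) =
      (a + (arr.countP (fun y => decide (y < x)) : Int),
       b + (arr.countP (fun y => decide (x < y)) : Int)) := by
  induction arr with
  | nil => intro a b; simp
  | cons h t ih =>
    intro a b
    rw [List.foldl_cons]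
    by_cases hne : x ≠ h
    · by_cases hgt : x > h
      · have hstep : (if x ≠ h then if x > h then ((a,b).1 + 1, (a,b).2) else ((a,b).1, (a,b).2 + 1) else (a,b)) = (a + 1, b) := by
          simp [hne, hgt]
        rw [hstep, ih]
        have h1 : decide (h < x) = true := by simp [hgt]
        have h2 : decide (x < h) = false := by simp; omega
        simp only [List.countP_cons, h1, h2]
        simp [Prod.ext_iff]; omega
      · have hstep : (if x ≠ h then if x > h then ((a,b).1 + 1, (a,b).2) else ((a,b).1, (a,b).2 + 1) else (a,b)) = (a, b + 1) := by
          simp [hne, hgt]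
        rw [hstep, ih]
        have h1 : decide (h < x) = false := by simp; omega
        have h2 : decide (x < h) = true := by simp; omega
        simp only [List.countP_cons, h1, h2]
        simp [Prod.ext_iff]; omega
    · simp only [ne_eq, not_not] at hne
      subst hne
      have hstep : (if x ≠ x then if x > x then ((a,b).1 + 1, (a,b).2) else ((a,b).1, (a,b).2 + 1) else (a,b)) = (a, b) := by
        simp
      rw [hstep, ih]
      simp

theorem aInner_eq (arr : List Int) (x : Int) :
    aInner arr x =
      ((arr.countP (fun y => decide (y < x)) : Int),
       (arr.countP (fun y => decide (x < y)) : Int)) := by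
  unfold aInner
  rw [PySem.List.foldl_pyRange_zero_pyGetD arr 0
      (fun (cc : Int × Int) y =>
        if x ≠ y then
          if x > y then (cc.1 + 1, cc.2) else (cc.1, cc.2 + 1)
        else cc) (0, 0)]
  rw [aInner_fold]; simp

theorem aLoop_eq (arr : List Int) : ∀ (m k : Nat), m = arr.length - k →
    aLoop arr (PySem.List.pyRange (k : Int) (PySem.List.len arr) 1) =
      (arr.drop k).find? (medPred arr) := by
  intro m
  induction m with
  | zero =>
    intro k hk
    have hle : arr.length ≤ k := by omega
    rw [PySem.List.pyRange_one_eq_nil (by simp [PySem.List.len_eq]; exact_mod_cast hle)]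
    rw [List.drop_eq_nil_of_le hle]
    rfl
  | succ m ih =>
    intro k hk
    have hlt : k < arr.length := by omega
    rw [PySem.List.pyRange_one_cons (by simp [PySem.List.len_eq]; exact_mod_cast hlt)]
    show (let x := PySem.List.pyGetD arr (k : Int) 0;
          let cc := aInner arr x;
          if cc.2 = cc.1 then some x else aLoop arr (PySem.List.pyRange ((k : Int) + 1) (PySem.List.len arr) 1)) = _
    have hx : PySem.List.pyGetD arr (k : Int) 0 = arr[k] := by
      rw [PySem.List.pyGetD_natCast]; exact List.getD_eq_getElem arr 0 hlt
    rw [List.drop_eq_getElem_cons hlt, List.find?_cons]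
    simp only [hx, aInner_eq]
    have hcast : ((k : Int) + 1) = ((k + 1 : Nat) : Int) := by push_cast; ring
    rw [hcast, ih (k + 1) (by omega)]
    by_cases hp : medPred arr arr[k]
    · have : ((arr.countP (fun y => decide (arr[k] < y)) : Int)) = ((arr.countP (fun y => decide (y < arr[k])) : Int)) := by
        unfold medPred at hp; simp at hp; exact_mod_cast hp
      simp [this, hp]
    · have : ¬ ((arr.countP (fun y => decide (arr[k] < y)) : Int)) = ((arr.countP (fun y => decide (y < arr[k])) : Int)) := by
        unfold medPred at hp; simp at hp; exact_mod_cast hp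
      simp [this, hp]

theorem get_mediana_eq_find (arr : List Int) :
    get_mediana arr = arr.find? (medPred arr) := by
  have h := aLoop_eq arr arr.length 0 (by omega)
  simpa using h

theorem dict_inv (p : List Int) (hp : p.Pairwise (· ≤ ·)) :
    (∀ x : Int,
      ((PySem.List.enumerate p).foldl dstep (PySem.Dict.empty, PySem.Dict.empty)).1.get? x =
        if x ∈ p then some ((p.countP (fun y => decide (y < x)) : Int)) else none) ∧
    (∀ x : Int,
      ((PySem.List.enumerate p).foldl dstep (PySem.Dict.empty, PySem.Dict.empty)).2.get? x =
        if x ∈ p then some ((p.countP (fun y => decide (y ≤ x)) : Int)) else none) := by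
  induction p using List.reverseRecOn with
  | nil => constructor <;> intro x <;> simp [PySem.List.enumerate_nil, PySem.Dict.get?_empty]
  | append_singleton q w ih =>
    have hq : q.Pairwise (· ≤ ·) := (List.pairwise_append.mp hp).1
    have hle : ∀ a ∈ q, a ≤ w := by
      intro a ha
      exact (List.pairwise_append.mp hp).2.2 a ha w (by simp)
    obtain ⟨ih1, ih2⟩ := ih hq
    rw [PySem.List.enumerate_append, List.foldl_append]
    rw [show PySem.List.enumerate [w] ((0:Int) + q.length) = [((q.length : Int), w)] by
      simp [PySem.List.enumerate_cons, PySem.List.enumerate_nil]]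
    set F := (PySem.List.enumerate q).foldl dstep (PySem.Dict.empty, PySem.Dict.empty) with hF
    simp only [List.foldl_cons, List.foldl_nil]
    constructor
    · intro x
      show (F.1.setdefault w (q.length : Int)).get? x = _
      by_cases hxw : x = w
      · subst hxw
        rw [PySem.Dict.get?_setdefault_self, ih1 x]
        by_cases hxq : x ∈ q
        · -- x already present: kept value countP (<x) q; the appended x adds 0
          have : (q ++ [x]).countP (fun y => decide (y < x)) = q.countP (fun y => decide (y < x)) := by
            simp [List.countP_append]
          simp [hxq, this]
        · -- fresh key: value q.length; every element of q is < x
          have hall : ∀ a ∈ q, a < x := by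
            intro a ha
            rcases lt_or_eq_of_le (hle a ha) with h | h
            · exact h
            · exact absurd (h ▸ ha) hxq
          have hcnt : q.countP (fun y => decide (y < x)) = q.length := by
            rw [List.countP_eq_length]
            intro a ha; simpa using hall a ha
          have : (q ++ [x]).countP (fun y => decide (y < x)) = q.length := by
            simp [List.countP_append, hcnt]
          simp [hxq, this]
      · rw [PySem.Dict.get?_setdefault_of_ne F.1 _ hxw, ih1 x]
        have hmem : x ∈ q ++ [w] ↔ x ∈ q := by simp [hxw]
        by_cases hxq : x ∈ q
        · have hxle : x ≤ w := hle x hxq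
          have : ¬ (w < x) := by omega
          simp [hmem, hxq, List.countP_append, this]
        · simp [hmem, hxq]
    · intro x
      show (F.2.insert w ((q.length : Int) + 1)).get? x = _
      by_cases hxw : x = w
      · subst hxw
        rw [PySem.Dict.get?_insert_self]
        have hcnt : q.countP (fun y => decide (y ≤ x)) = q.length := by
          rw [List.countP_eq_length]
          intro a ha; simpa using hle a ha
        have : (q ++ [x]).countP (fun y => decide (y ≤ x)) = q.length + 1 := by
          simp [List.countP_append, hcnt]
        simp [this]
      · rw [PySem.Dict.get?_insert_of_ne F.2 _ hxw, ih2 x]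
        have hmem : x ∈ q ++ [w] ↔ x ∈ q := by simp [hxw]
        by_cases hxq : x ∈ q
        · have hxle : x ≤ w := hle x hxq
          have : ¬ (w ≤ x) := by
            intro h
            exact hxw (le_antisymm hxle h)
          simp [hmem, hxq, List.countP_append, this]
        · simp [hmem, hxq]

-- find? only looks at the predicate's value on members
theorem find?_congr_mem {α : Type} (l : List α) (p q : α → Bool)
    (h : ∀ x ∈ l, p x = q x) : l.find? p = l.find? q := by
  induction l with
  | nil => rfl
  | cons a t ih =>
    rw [List.find?_cons, List.find?_cons, h a (by simp)]
    cases q a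
    · exact ih (fun x hx => h x (by simp [hx]))
    · rfl

theorem get_mediana_alt_eq_find (arr : List Int) :
    get_mediana_alt arr = arr.find? (medPred arr) := by
  unfold get_mediana_alt
  set s := PySem.List.sorted arr (fun v => v) false with hs
  have hpair : s.Pairwise (· ≤ ·) := PySem.List.sorted_pairwise arr (fun v => v)
  have hperm : s.Perm arr := PySem.List.sorted_perm arr (fun v => v) false
  obtain ⟨h1, h2⟩ := dict_inv s hpair
  apply find?_congr_mem
  intro x hx
  have hxs : x ∈ s := hperm.mem_iff.mpr hx
  have hg1 : ((PySem.List.enumerate s).foldl dstep (PySem.Dict.empty, PySem.Dict.empty)).1.getD x 0 =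
      ((s.countP (fun y => decide (y < x)) : Int)) := by
    rw [PySem.Dict.getD_eq_get?_getD, h1 x, if_pos hxs]; rfl
  have hg2 : ((PySem.List.enumerate s).foldl dstep (PySem.Dict.empty, PySem.Dict.empty)).2.getD x 0 =
      ((s.countP (fun y => decide (y ≤ x)) : Int)) := by
    rw [PySem.Dict.getD_eq_get?_getD, h2 x, if_pos hxs]; rfl
  rw [hg1, hg2]
  have hc1 : s.countP (fun y => decide (y < x)) = arr.countP (fun y => decide (y < x)) :=
    hperm.countP_eq _
  have hc2 : s.countP (fun y => decide (y ≤ x)) = arr.countP (fun y => decide (y ≤ x)) :=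
    hperm.countP_eq _
  have hlen : s.length = arr.length := hperm.length_eq
  have hsplit : arr.length = arr.countP (fun y => decide (y ≤ x)) + arr.countP (fun y => decide (x < y)) := by
    rw [List.length_eq_countP_add_countP (fun y => decide (y ≤ x))]
    congr 1
    apply List.countP_congr
    intro a _
    by_cases h : a ≤ x
    · simp [h]
    · simp [h]; omega
  rw [Bool.eq_iff_iff]
  unfold medPred
  simp only [beq_iff_eq, PySem.List.len_eq, hc1, hc2, hlen]
  constructor
  · intro h
    have := hsplit
    omega
  · intro h
    have := hsplit
    omega

-- ===== VERDICT (by name: the statement is the Claim_ definition above) =====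
theorem get_mediana_spec : Claim_equal_get_mediana := by
  intro arr _
  unfold Spec_get_mediana
  rw [get_mediana_eq_find, get_mediana_alt_eq_find]
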